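-- pv_equiv track=rewrite | github.com/zhibolau/leetcodePython | bad hair day cow see hair.py | seeCows
-- ===== SOURCE A (Python) =====
-- def  seeCows(cows):
--     heights=cows
--     heightStack = [] #stack里面放的都是比他矮的，  碰到高的就pop
--     heightStack.append(len(heights))
--     count = 0
--     for i in range(len(heights) - 1, -1, -1):
--         height = heights[i]
--         while len(heightStack) > 1 and heights[heightStack[-1]] < height: #stack里面放的是index；
--             heightStack.pop()
--         count += heightStack[-1] - i - 1
--         heightStack.append(i)
--     return count
-- ===== SOURCE B (Python) =====
-- def seeCows(cows):
--     n = len(cows)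
--     total = 0
--     for i in range(n):
--         j = i + 1
--         while j < n and cows[j] < cows[i]:
--             j += 1
--         total += j - i - 1
--     return total
-- ===== Notes on version B (the rewrite author's own statement) =====
-- stated objective: simpler
-- what changed: Replaced the right-to-left index stack with sentinel by a plain forward scan: for each cow, walk right over strictly shorter cows and add that span, no stack or sentinel at all.
import Mathlib
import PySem

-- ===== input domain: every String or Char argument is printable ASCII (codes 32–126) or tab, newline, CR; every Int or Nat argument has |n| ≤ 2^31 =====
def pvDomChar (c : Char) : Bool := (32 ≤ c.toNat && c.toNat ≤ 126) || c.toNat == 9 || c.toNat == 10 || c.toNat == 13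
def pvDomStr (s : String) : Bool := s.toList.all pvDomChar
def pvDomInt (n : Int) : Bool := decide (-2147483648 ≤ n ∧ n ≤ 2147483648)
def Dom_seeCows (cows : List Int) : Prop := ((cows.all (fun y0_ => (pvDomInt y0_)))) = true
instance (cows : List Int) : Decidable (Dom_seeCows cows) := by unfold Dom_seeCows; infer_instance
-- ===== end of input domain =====

-- B replaces A's right-to-left index stack (with sentinel) by a sentinel-free forward
-- scan per cow; objective: simpler.  A = B is proved on all inputs (both are total).

-- ===== PORT A =====
-- the while-loop: pop indices (stack top = list head) while len > 1 and heights[top] < height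
-- (heights[t] is in range whenever the guard fires, so the .getD 0 default is never the result)
def aPop (h : List Int) (height : Int) : List Int → List Int
  | t :: r :: rest =>
      if (PySem.List.pyGet? h t).getD 0 < height then aPop h height (r :: rest)
      else t :: r :: rest
  | s => s

-- one iteration of A's for-loop (state = (heightStack, count)); i ∈ [0, n) so pyGet? hits
def aStep (h : List Int) (s : List Int × Int) (i : Int) : List Int × Int :=
  let height := (PySem.List.pyGet? h i).getD 0
  let st := aPop h height s.1
  (i :: st, s.2 + st.headD 0 - i - 1)

def seeCows (cows : List Int) : Int :=
  ((PySem.List.pyRange ((cows.length : Int) - 1) (-1) (-1)).foldl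
     (aStep cows) ([(cows.length : Int)], 0)).2

-- ===== PORT B =====
-- Source B inner while-loop: advance j over strictly shorter cows
def bScan (h : List Int) (x : Int) (j : Nat) : Nat :=
  if hj : j < h.length then
    if h.getD j 0 < x then bScan h x (j + 1) else j
  else j
termination_by h.length - j

-- Source B outer for-loop with accumulator total
def bLoop (h : List Int) (i : Nat) (t : Int) : Int :=
  if i < h.length then
    bLoop h (i + 1) (t + ((bScan h (h.getD i 0) (i + 1) : Int) - (i : Int) - 1))
  else t
termination_by h.length - i

def seeCows_alt (cows : List Int) : Int := bLoop cows 0 0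

-- ===== PRECONDITION & SPEC =====
def Spec_seeCows (cows : List Int) (out : Int) : Prop := out = seeCows_alt cows
instance (cows : List Int) (out : Int) : Decidable (Spec_seeCows cows out) := by unfold Spec_seeCows; infer_instance

-- ===== CLAIM (what is proved, stated in full; the proofs are below) =====
def Claim_equal_seeCows : Prop := ∀ (cows : List Int), Dom_seeCows cows → Spec_seeCows cows (seeCows cows)

-- ===== LEMMAS AND PROOFS =====

theorem bScan_ge (h : List Int) (x : Int) (j : Nat) : j ≤ bScan h x j := by
  fun_induction bScan h x j <;> omega

theorem bScan_le (h : List Int) (x : Int) (j : Nat) (hj : j ≤ h.length) :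
    bScan h x j ≤ h.length := by
  fun_induction bScan h x j <;> omega

theorem bScan_mid (h : List Int) (x : Int) (j : Nat) :
    ∀ k, j ≤ k → k < bScan h x j → h.getD k 0 < x := by
  fun_induction bScan h x j with
  | case1 j hj hx ih =>
      intro k hk1 hk2
      rcases Nat.eq_or_lt_of_le hk1 with rfl | hlt
      · exact hx
      · exact ih k hlt hk2
  | case2 j hj hx => intro k hk1 hk2; omega
  | case3 j hj => intro k hk1 hk2; omega

theorem bScan_stop (h : List Int) (x : Int) (j : Nat)
    (hr : bScan h x j < h.length) : ¬ h.getD (bScan h x j) 0 < x := by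
  fun_induction bScan h x j with
  | case1 j hj hx ih => exact ih hr
  | case2 j hj hx => exact hx
  | case3 j hj => omega

theorem bScan_le_stop (h : List Int) (x : Int) (j k : Nat)
    (hstop : k < h.length → ¬ h.getD k 0 < x) : bScan h x j ≤ k ∨ k < j := by
  fun_induction bScan h x j with
  | case1 j hj hx ih =>
      rcases ih with hl | hr
      · exact Or.inl hl
      · rcases Nat.lt_or_ge k j with hkj | hjk
        · exact Or.inr hkj
        · have : k = j := by omega
          subst this
          exact absurd hx (hstop hj)
  | case2 j hj hx => omega
  | case3 j hj => omega

-- next index ≥ i+1 whose height is not smaller (h.length if none): B's scan for cow i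
def nge (h : List Int) (i : Nat) : Nat := bScan h (h.getD i 0) (i + 1)

theorem nge_gt (h : List Int) (i : Nat) : i < nge h i := by
  have := bScan_ge h (h.getD i 0) (i + 1); unfold nge; omega

theorem nge_le (h : List Int) (i : Nat) (hi : i < h.length) : nge h i ≤ h.length :=
  bScan_le _ _ _ (by omega)

theorem nge_mid (h : List Int) (i k : Nat) (hik : i < k) (hk : k < nge h i) :
    h.getD k 0 < h.getD i 0 :=
  bScan_mid h _ (i + 1) k (by omega) hk

theorem nge_stop (h : List Int) (i : Nat) (hr : nge h i < h.length) :
    ¬ h.getD (nge h i) 0 < h.getD i 0 :=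
  bScan_stop h _ (i + 1) hr

-- A's stack after the iteration for index i: the chain i, nge i, nge (nge i), …, n
def chain (h : List Int) (i : Nat) : List Int :=
  if _hi : i < h.length then (i : Int) :: chain h (nge h i) else [(h.length : Int)]
termination_by h.length - i
decreasing_by have := nge_gt h i; omega

theorem chain_ne_nil (h : List Int) (i : Nat) : chain h i ≠ [] := by
  rw [chain]; split <;> simp

theorem chain_headD (h : List Int) (i : Nat) (hi : i ≤ h.length) :
    (chain h i).headD 0 = (i : Int) := by
  rw [chain]; split
  · rfl
  · simp; omega

theorem pyGetD_getD (h : List Int) (m : Nat) :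
    (PySem.List.pyGet? h (m : Int)).getD 0 = h.getD m 0 := by
  simp [PySem.List.pyGet?_natCast, List.getD]

theorem pop_chain (h : List Int) (i m : Nat) (hi : i < h.length) (him : i < m)
    (hm : m ≤ nge h i) :
    aPop h (h.getD i 0) (chain h m) = chain h (nge h i) := by
  rcases Nat.lt_or_eq_of_le hm with hlt | heq
  · have hmn : m < h.length := lt_of_lt_of_le hlt (nge_le h i hi)
    have hsm : h.getD m 0 < h.getD i 0 := nge_mid h i m him hlt
    have hch : chain h m = (m : Int) :: chain h (nge h m) := by rw [chain]; simp [hmn]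
    obtain ⟨r, rest, hrr⟩ : ∃ r rest, chain h (nge h m) = r :: rest := by
      cases hc : chain h (nge h m) with
      | nil => exact absurd hc (chain_ne_nil h _)
      | cons a b => exact ⟨a, b, rfl⟩
    have hstep : aPop h (h.getD i 0) (chain h m) = aPop h (h.getD i 0) (chain h (nge h m)) := by
      rw [hch, hrr, aPop, pyGetD_getD, if_pos hsm, ← hrr]
    rw [hstep]
    have h1 : i < nge h m := lt_trans him (nge_gt h m)
    have h2 : nge h m ≤ nge h i := by
      rcases bScan_le_stop h (h.getD m 0) (m + 1) (nge h i)
          (fun hlen hcon => nge_stop h i hlen (lt_trans hcon hsm)) with hl | hr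
      · exact hl
      · omega
    exact pop_chain h i (nge h m) hi h1 h2
  · subst heq
    by_cases hmn : nge h i < h.length
    · have hch : chain h (nge h i) = ((nge h i : Nat) : Int) :: chain h (nge h (nge h i)) := by
        rw [chain]; simp [hmn]
      obtain ⟨r, rest, hrr⟩ : ∃ r rest, chain h (nge h (nge h i)) = r :: rest := by
        cases hc : chain h (nge h (nge h i)) with
        | nil => exact absurd hc (chain_ne_nil h _)
        | cons a b => exact ⟨a, b, rfl⟩
      rw [hch, hrr, aPop, pyGetD_getD, if_neg (nge_stop h i hmn), ← hrr, ← hch]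
    · have hch : chain h (nge h i) = [(h.length : Int)] := by rw [chain]; simp [hmn]
      rw [hch]
      rfl
termination_by nge h i - m
decreasing_by have := nge_gt h m; omega

-- prefix sum of A's per-index contributions, counted from the right end down to 0
def Sdown (h : List Int) : Nat → Int
  | 0 => 0
  | i + 1 => Sdown h i + ((nge h i : Int) - (i : Int) - 1)

-- suffix sum: what B adds to total from index i on
def Ssum (h : List Int) (i : Nat) : Int :=
  if i < h.length then ((nge h i : Int) - (i : Int) - 1) + Ssum h (i + 1) else 0
termination_by h.length - i

theorem aStep_chain (h : List Int) (i : Nat) (c : Int) (hi : i < h.length) :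
    aStep h (chain h (i + 1), c) (i : Int)
      = (chain h i, c + ((nge h i : Int) - (i : Int) - 1)) := by
  unfold aStep
  rw [pyGetD_getD]
  have hpop : aPop h (h.getD i 0) (chain h (i + 1)) = chain h (nge h i) :=
    pop_chain h i (i + 1) hi (by omega) (by have := nge_gt h i; omega)
  simp only [hpop]
  rw [chain_headD h (nge h i) (nge_le h i hi)]
  rw [show chain h i = (i : Int) :: chain h (nge h i) by rw [chain]; simp [hi]]
  simp only [Prod.mk.injEq]
  exact ⟨trivial, by ring⟩

theorem fold_chain (h : List Int) : ∀ (i : Nat), i ≤ h.length → ∀ (c : Int),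
    (PySem.List.pyRange ((i : Int) - 1) (-1) (-1)).foldl (aStep h) (chain h i, c)
      = (chain h 0, c + Sdown h i) := by
  intro i
  induction i with
  | zero =>
      intro _ c
      rw [PySem.List.pyRange_neg_one_eq_nil (by norm_num)]
      simp [Sdown]
  | succ i ih =>
      intro hle c
      have hcast : ((i + 1 : Nat) : Int) - 1 = (i : Int) := by push_cast; ring
      rw [hcast, PySem.List.pyRange_neg_one_cons (by omega), List.foldl_cons,
          aStep_chain h i c (by omega), ih (by omega)]
      simp only [Sdown, Prod.mk.injEq]
      exact ⟨trivial, by ring⟩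

theorem seeCows_eq_Sdown (cows : List Int) : seeCows cows = Sdown cows cows.length := by
  unfold seeCows
  have hch : chain cows cows.length = [(cows.length : Int)] := by
    rw [chain]; simp
  rw [← hch, fold_chain cows cows.length le_rfl 0, zero_add]

theorem bLoop_eq (h : List Int) (i : Nat) (t : Int) : bLoop h i t = t + Ssum h i := by
  fun_induction bLoop h i t with
  | case1 i t hi ih =>
      have hS : Ssum h i = ((nge h i : Int) - (i : Int) - 1) + Ssum h (i + 1) := by
        rw [Ssum]; simp [hi]
      rw [ih, hS, nge]
      ring
  | case2 i t hi =>
      have hS : Ssum h i = 0 := by rw [Ssum]; simp [hi]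
      rw [hS, add_zero]

theorem sums_bridge (h : List Int) : ∀ (k i : Nat), i + k = h.length →
    Sdown h h.length = Sdown h i + Ssum h i := by
  intro k
  induction k with
  | zero =>
      intro i hik
      have hi : i = h.length := by omega
      rw [hi]
      have hS : Ssum h h.length = 0 := by rw [Ssum]; simp
      rw [hS, add_zero]
  | succ k ih =>
      intro i hik
      have hi : i < h.length := by omega
      have hS : Ssum h i = ((nge h i : Int) - (i : Int) - 1) + Ssum h (i + 1) := by
        rw [Ssum]; simp [hi]
      rw [ih (i + 1) (by omega), hS,
          show Sdown h (i + 1) = Sdown h i + ((nge h i : Int) - (i : Int) - 1) from rfl]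
      ring

-- ===== VERDICT (by name: the statement is the Claim_ definition above) =====
theorem seeCows_spec : Claim_equal_seeCows := by
  intro cows _
  unfold Spec_seeCows seeCows_alt
  rw [seeCows_eq_Sdown, bLoop_eq, sums_bridge cows cows.length 0 (by omega),
      show Sdown cows 0 = 0 from rfl, zero_add]
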